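-- pv_equiv track=rewrite | github.com/craig-van-hise/data-viz | timelines/Film Composers/scripts/scrape_and_verify_links.py | get_films_to_process
-- ===== SOURCE A (Python) =====
-- def get_films_to_process(films, threshold=12):
--     """
--     Returns a list of indices representing which films need scraping.
--
--     1. State 1 & 2 (Total Blank/Failure):
--        If the array has 0 valid youtube_links (missing or every link is null), return ALL indices.
--
--     2. State 3 (Cascades & Blocks):
--        Find contiguous blocks of missing or null links. If a block's length >= threshold,
--        add the indices of THAT block to the return list.
--     """
--     valid_links_count = sum(1 for film in films if film.get('youtube_link'))
--
--     if valid_links_count == 0: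
--         return list(range(len(films)))
--
--     target_indices = []
--     current_block = []
--
--     for i, film in enumerate(films):
--         if not film.get('youtube_link'):
--             current_block.append(i)
--         else:
--             if len(current_block) >= threshold:
--                 target_indices.extend(current_block)
--             current_block = []
--
--     # Don't forget the last block
--     if len(current_block) >= threshold:
--         target_indices.extend(current_block)
--
--     return target_indices
-- ===== SOURCE B (Python) =====
-- def get_films_to_process(films, threshold=12):
--     valid = [i for i, film in enumerate(films) if film.get('youtube_link')]
--     if not valid:
--         return list(range(len(films)))
--     out = []
--     start = 0
--     for v in valid:
--         if v - start >= threshold: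
--             out.extend(range(start, v))
--         start = v + 1
--     if len(films) - start >= threshold:
--         out.extend(range(start, len(films)))
--     return out
-- ===== Notes on version B (the rewrite author's own statement) =====
-- stated objective: alternative
-- what changed: Replaces A's per-film state-machine scan that accumulates a current_block list with a pass over the sorted valid-link indices, emitting each inter-valid gap of length >= threshold as a range.
import Mathlib
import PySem

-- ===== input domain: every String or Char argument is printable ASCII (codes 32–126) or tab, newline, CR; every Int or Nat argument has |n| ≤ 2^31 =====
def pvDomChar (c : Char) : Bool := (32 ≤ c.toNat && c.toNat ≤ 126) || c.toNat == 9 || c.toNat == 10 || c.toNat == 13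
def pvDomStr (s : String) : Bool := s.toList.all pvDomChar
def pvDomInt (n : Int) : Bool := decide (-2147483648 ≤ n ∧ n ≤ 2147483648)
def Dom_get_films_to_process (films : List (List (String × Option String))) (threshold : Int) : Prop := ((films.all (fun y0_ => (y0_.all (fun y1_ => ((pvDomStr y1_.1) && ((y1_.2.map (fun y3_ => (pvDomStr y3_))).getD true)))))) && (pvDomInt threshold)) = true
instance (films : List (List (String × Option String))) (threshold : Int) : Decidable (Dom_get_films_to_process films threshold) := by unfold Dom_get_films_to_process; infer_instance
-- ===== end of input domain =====

-- B differs from A by decomposition: A runs a per-film state machine accumulating a current_block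
-- list; B collects the valid-link indices once and emits each inter-valid gap of length ≥ threshold.

-- truthiness of film.get('youtube_link'): present, non-None and a non-empty string
def pyLinkTruthy (film : List (String × Option String)) : Bool :=
  match (PySem.Dict.mk film).get? "youtube_link" with
  | some (some s) => s != ""
  | _ => false

-- ===== PORT A =====
def stepA (threshold : Int) (st : List Int × List Int) (p : Int × List (String × Option String)) :
    List Int × List Int :=
  if !(pyLinkTruthy p.2) then (st.1, st.2 ++ [p.1])
  else (if (st.2.length : Int) ≥ threshold then st.1 ++ st.2 else st.1, [])

def get_films_to_process (films : List (List (String × Option String))) (threshold : Int) : List Int :=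
  let valid_links_count : Int :=
    (films.map (fun film => if pyLinkTruthy film then (1 : Int) else 0)).sum
  if valid_links_count = 0 then PySem.List.pyRange 0 films.length 1
  else
    let st := (PySem.List.enumerate films 0).foldl (stepA threshold) ([], [])
    if (st.2.length : Int) ≥ threshold then st.1 ++ st.2 else st.1

-- ===== PORT B =====
def stepB (threshold : Int) (st : List Int × Int) (v : Int) : List Int × Int :=
  (if v - st.2 ≥ threshold then st.1 ++ PySem.List.pyRange st.2 v 1 else st.1, v + 1)

def get_films_to_process_alt (films : List (List (String × Option String))) (threshold : Int) : List Int :=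
  let valid := ((PySem.List.enumerate films 0).filter (fun p => pyLinkTruthy p.2)).map (·.1)
  if valid.isEmpty then PySem.List.pyRange 0 films.length 1
  else
    let st := valid.foldl (stepB threshold) ([], 0)
    if (films.length : Int) - st.2 ≥ threshold then
      st.1 ++ PySem.List.pyRange st.2 (films.length : Int) 1
    else st.1

-- ===== PRECONDITION & SPEC =====
def Spec_get_films_to_process (films : List (List (String × Option String))) (threshold : Int) (out : List Int) : Prop := out = get_films_to_process_alt films threshold
instance (films : List (List (String × Option String))) (threshold : Int) (out : List Int) : Decidable (Spec_get_films_to_process films threshold out) := by unfold Spec_get_films_to_process; infer_instance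

-- ===== CLAIM (what is proved, stated in full; the proofs are below) =====
def Claim_equal_get_films_to_process : Prop := ∀ (films : List (List (String × Option String))) (threshold : Int), Dom_get_films_to_process films threshold → Spec_get_films_to_process films threshold (get_films_to_process films threshold)

-- ===== LEMMAS AND PROOFS =====

-- finisher of A's scan: flush the trailing block if long enough
def finA (th : Int) (st : List Int × List Int) : List Int :=
  if (st.2.length : Int) ≥ th then st.1 ++ st.2 else st.1

-- finisher of B's gap pass: the trailing gap [start, n)
def finB (th n : Int) (st : List Int × Int) : List Int :=
  if n - st.2 ≥ th then st.1 ++ PySem.List.pyRange st.2 n 1 else st.1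

lemma count_enum (fs : List (List (String × Option String))) (s : Int) :
    ((PySem.List.enumerate fs s).filter (fun p => pyLinkTruthy p.2)).length
      = fs.countP pyLinkTruthy := by
  induction fs generalizing s with
  | nil => simp [PySem.List.enumerate_nil]
  | cons f fs ih =>
    simp only [PySem.List.enumerate_cons, List.filter_cons, List.countP_cons]
    by_cases h : pyLinkTruthy f
    · simp [h, ih]
    · simp [h, ih]

lemma count_eq_sum (fs : List (List (String × Option String))) :
    (fs.map (fun film => if pyLinkTruthy film then (1 : Int) else 0)).sum
      = (fs.countP pyLinkTruthy : Int) := by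
  induction fs with
  | nil => simp
  | cons f fs ih =>
    simp only [List.map_cons, List.sum_cons, List.countP_cons, ih]
    by_cases h : pyLinkTruthy f
    · simp [h]; ring
    · simp [h]

lemma scan_eq (th : Int) (fs : List (List (String × Option String))) :
    ∀ (i : Int) (out : List Int) (start : Int), start ≤ i →
    finA th ((PySem.List.enumerate fs i).foldl (stepA th) (out, PySem.List.pyRange start i 1))
      = finB th (i + (fs.length : Int))
          ((((PySem.List.enumerate fs i).filter (fun p => pyLinkTruthy p.2)).map (·.1)).foldl
            (stepB th) (out, start)) := by
  induction fs with
  | nil =>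
    intro i out start hsi
    rw [PySem.List.enumerate_nil]
    simp only [List.foldl_nil, List.filter_nil, List.map_nil, List.length_nil,
      Int.natCast_zero, add_zero]
    unfold finA finB
    rw [PySem.List.length_pyRange_one,
      show (((i - start).toNat : Int)) = i - start from by omega]
  | cons f fs ih =>
    intro i out start hsi
    rw [PySem.List.enumerate_cons, List.foldl_cons]
    have hcast : i + (((f :: fs).length : Nat) : Int) = (i + 1) + (fs.length : Int) := by
      simp [List.length_cons]; ring
    by_cases h : pyLinkTruthy f
    · have e1 : stepA th (out, PySem.List.pyRange start i 1) (i, f)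
          = ((if i - start ≥ th then out ++ PySem.List.pyRange start i 1 else out),
             PySem.List.pyRange (i + 1) (i + 1) 1) := by
        simp only [stepA, h, Bool.not_true, Bool.false_eq_true, if_false,
          PySem.List.pyRange_one_eq_nil le_rfl]
        rw [PySem.List.length_pyRange_one,
          show (((i - start).toNat : Int)) = i - start from by omega]
      rw [e1, List.filter_cons_of_pos (by simpa using h), List.map_cons, List.foldl_cons,
        show stepB th (out, start) i
            = ((if i - start ≥ th then out ++ PySem.List.pyRange start i 1 else out), i + 1)
          from rfl,
        ih (i + 1) _ (i + 1) le_rfl, hcast]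
    · have e1 : stepA th (out, PySem.List.pyRange start i 1) (i, f)
          = (out, PySem.List.pyRange start (i + 1) 1) := by
        simp only [stepA, h, Bool.not_false, if_true]
        rw [PySem.List.pyRange_one_succ_right hsi]
      rw [e1, List.filter_cons_of_neg (by simpa using h),
        ih (i + 1) out start (by omega), hcast]

-- ===== VERDICT (by name: the statement is the Claim_ definition above) =====
theorem get_films_to_process_spec : Claim_equal_get_films_to_process := by
  intro films threshold _
  unfold Spec_get_films_to_process get_films_to_process get_films_to_process_alt
  by_cases hz : films.countP pyLinkTruthy = 0
  · have h1 : (films.map (fun film => if pyLinkTruthy film then (1 : Int) else 0)).sum = 0 := by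
      rw [count_eq_sum]; exact_mod_cast hz
    have h2 : (((PySem.List.enumerate films 0).filter (fun p => pyLinkTruthy p.2)).map
        (·.1)).isEmpty = true := by
      rw [List.isEmpty_iff, List.map_eq_nil_iff, ← List.length_eq_zero_iff, count_enum]
      exact hz
    simp only [h1, h2, if_true]
  · have h1 : ¬ (films.map (fun film => if pyLinkTruthy film then (1 : Int) else 0)).sum = 0 := by
      rw [count_eq_sum]; exact_mod_cast hz
    have h2 : ¬ ((((PySem.List.enumerate films 0).filter (fun p => pyLinkTruthy p.2)).map
        (·.1)).isEmpty = true) := by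
      rw [List.isEmpty_iff, List.map_eq_nil_iff, ← List.length_eq_zero_iff, count_enum]
      exact hz
    have key := scan_eq threshold films 0 [] 0 le_rfl
    rw [PySem.List.pyRange_one_eq_nil le_rfl, zero_add] at key
    unfold finA finB at key
    simp only [if_neg h1, if_neg h2]
    exact key
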